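-- pv_equiv track=rewrite | github.com/rafaelnovakalberto-gif/RafaelLuis | funcoes.py | remover_dado
-- ===== SOURCE A (Python) =====
-- def remover_dado(dados_rolados, dados_no_estoque, dado_para_remover):
--     novo_estoque = []
--     for i in range(len(dados_no_estoque)):
--
--         if i == dado_para_remover:
--             dados_rolados.append(dados_no_estoque[i])
--             continue
--         novo_estoque.append(dados_no_estoque[i])
--
--     return [dados_rolados,novo_estoque]
-- ===== SOURCE B (Python) =====
-- def remover_dado(dados_rolados, dados_no_estoque, dado_para_remover):
--     if 0 <= dado_para_remover < len(dados_no_estoque):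
--         dados_rolados.append(dados_no_estoque[dado_para_remover])
--         novo_estoque = dados_no_estoque[:dado_para_remover] + dados_no_estoque[dado_para_remover + 1:]
--     else:
--         novo_estoque = list(dados_no_estoque)
--     return [dados_rolados, novo_estoque]
-- ===== Notes on version B (the rewrite author's own statement) =====
-- stated objective: simpler
-- what changed: Replaces the index-by-index loop with a single bounds check plus slicing: the removed element is fetched directly and the new stock is built from two slices, no loop at all.
import Mathlib
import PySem

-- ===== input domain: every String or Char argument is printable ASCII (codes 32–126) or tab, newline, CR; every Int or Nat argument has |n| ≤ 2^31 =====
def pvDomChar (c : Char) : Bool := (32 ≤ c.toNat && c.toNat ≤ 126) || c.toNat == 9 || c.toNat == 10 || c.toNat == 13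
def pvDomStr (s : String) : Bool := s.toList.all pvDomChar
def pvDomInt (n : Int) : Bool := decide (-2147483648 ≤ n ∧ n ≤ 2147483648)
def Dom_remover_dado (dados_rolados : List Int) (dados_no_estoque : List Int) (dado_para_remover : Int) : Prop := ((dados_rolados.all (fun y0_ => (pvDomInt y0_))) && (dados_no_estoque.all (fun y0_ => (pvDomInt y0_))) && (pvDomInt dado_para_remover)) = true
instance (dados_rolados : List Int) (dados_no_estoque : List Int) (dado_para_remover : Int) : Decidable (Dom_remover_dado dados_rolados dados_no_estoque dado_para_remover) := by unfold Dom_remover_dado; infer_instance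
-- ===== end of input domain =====

-- B replaces A's index loop with a bounds guard plus slicing (simpler); both mutate dados_rolados in place in Python, the proof is about the return value.


-- ===== PORT A =====
def remover_dado (dados_rolados : List Int) (dados_no_estoque : List Int) (dado_para_remover : Int) : List (List Int) :=
  -- loop over i in range(len): move xs[i] to rolados when i == idx, else to novo_estoque
  let p := (List.range dados_no_estoque.length).foldl
    (fun (st : List Int × List Int) i =>
      if (Int.ofNat i) = dado_para_remover then (st.1 ++ [dados_no_estoque.getD i 0], st.2)
      else (st.1, st.2 ++ [dados_no_estoque.getD i 0]))
    (dados_rolados, [])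
  [p.1, p.2]

-- ===== PORT B =====
def remover_dado_alt (dados_rolados : List Int) (dados_no_estoque : List Int) (dado_para_remover : Int) : List (List Int) :=
  -- bounds guard, direct fetch, and two slices xs[:k] ++ xs[k+1:]
  if 0 ≤ dado_para_remover ∧ dado_para_remover < (dados_no_estoque.length : Int) then
    let k := dado_para_remover.toNat
    [dados_rolados ++ [dados_no_estoque.getD k 0],
     dados_no_estoque.take k ++ dados_no_estoque.drop (k + 1)]
  else
    [dados_rolados, dados_no_estoque]

-- ===== PRECONDITION & SPEC =====
def Spec_remover_dado (dados_rolados : List Int) (dados_no_estoque : List Int) (dado_para_remover : Int) (out : List (List Int)) : Prop := out = remover_dado_alt dados_rolados dados_no_estoque dado_para_remover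
instance (dados_rolados : List Int) (dados_no_estoque : List Int) (dado_para_remover : Int) (out : List (List Int)) : Decidable (Spec_remover_dado dados_rolados dados_no_estoque dado_para_remover out) := by unfold Spec_remover_dado; infer_instance

-- ===== CLAIM (what is proved, stated in full; the proofs are below) =====
def Claim_equal_remover_dado : Prop := ∀ (dados_rolados : List Int) (dados_no_estoque : List Int) (dado_para_remover : Int), Dom_remover_dado dados_rolados dados_no_estoque dado_para_remover → Spec_remover_dado dados_rolados dados_no_estoque dado_para_remover (remover_dado dados_rolados dados_no_estoque dado_para_remover)

-- ===== LEMMAS AND PROOFS =====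
lemma remover_loop (dados_no_estoque : List Int) (dado_para_remover : Int)
    (r : List Int) :
    (List.range dados_no_estoque.length).foldl
      (fun (st : List Int × List Int) i =>
        if (Int.ofNat i) = dado_para_remover then (st.1 ++ [dados_no_estoque.getD i 0], st.2)
        else (st.1, st.2 ++ [dados_no_estoque.getD i 0]))
      (r, []) =
    (if 0 ≤ dado_para_remover ∧ dado_para_remover < (dados_no_estoque.length : Int) then
      (r ++ [dados_no_estoque.getD dado_para_remover.toNat 0],
       dados_no_estoque.take dado_para_remover.toNat ++ dados_no_estoque.drop (dado_para_remover.toNat + 1))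
    else (r, dados_no_estoque)) := by
  induction dados_no_estoque using List.reverseRecOn with
  | nil =>
    simp only [List.length_nil, List.range_zero, List.foldl_nil]
    split_ifs with h
    · omega
    · rfl
  | append_singleton ys y ih =>
    have hcg : ∀ (st : List Int × List Int),
        (List.range ys.length).foldl
          (fun (st : List Int × List Int) i =>
            if (Int.ofNat i) = dado_para_remover then (st.1 ++ [(ys ++ [y]).getD i 0], st.2)
            else (st.1, st.2 ++ [(ys ++ [y]).getD i 0])) st =
        (List.range ys.length).foldl
          (fun (st : List Int × List Int) i =>
            if (Int.ofNat i) = dado_para_remover then (st.1 ++ [ys.getD i 0], st.2)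
            else (st.1, st.2 ++ [ys.getD i 0])) st := by
      intro st
      apply List.foldl_ext
      intro b i hi
      have hi' : i < ys.length := List.mem_range.mp hi
      have : (ys ++ [y]).getD i 0 = ys.getD i 0 := by
        rw [List.getD_eq_getElem?_getD, List.getD_eq_getElem?_getD,
            List.getElem?_append_left hi']
      rw [this]
    rw [List.length_append, List.length_singleton, List.range_succ, List.foldl_append,
        hcg, ih]
    by_cases h0 : 0 ≤ dado_para_remover ∧ dado_para_remover < (ys.length : Int)
    · -- index strictly inside ys
      have hk : dado_para_remover.toNat < ys.length := by omega
      have h1 : 0 ≤ dado_para_remover ∧ dado_para_remover < ((ys.length + 1 : Nat) : Int) := by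
        push_cast; omega
      rw [if_pos h0, if_pos h1]
      simp only [List.foldl_cons, List.foldl_nil]
      have hne : Int.ofNat ys.length ≠ dado_para_remover := by simp only [Int.ofNat_eq_natCast]; omega
      rw [if_neg hne]
      have e1 : (ys ++ [y]).getD dado_para_remover.toNat 0 = ys.getD dado_para_remover.toNat 0 := by
        rw [List.getD_eq_getElem?_getD, List.getD_eq_getElem?_getD,
            List.getElem?_append_left hk]
      have e2 : (ys ++ [y]).take dado_para_remover.toNat = ys.take dado_para_remover.toNat := by
        rw [List.take_append_of_le_length (by omega)]
      have e3 : (ys ++ [y]).drop (dado_para_remover.toNat + 1) =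
          ys.drop (dado_para_remover.toNat + 1) ++ [y] := by
        rw [List.drop_append_of_le_length (by omega)]
      have e4 : (ys ++ [y]).getD ys.length 0 = y := by
        rw [List.getD_eq_getElem?_getD, List.getElem?_append_right le_rfl]
        simp
      rw [e1, e2, e3, e4, List.append_assoc]
    · by_cases h1 : dado_para_remover = (ys.length : Int)
      · -- removing exactly the last element
        have h2 : 0 ≤ dado_para_remover ∧ dado_para_remover < ((ys.length + 1 : Nat) : Int) := by
          push_cast; omega
        rw [if_neg h0, if_pos h2]
        simp only [List.foldl_cons, List.foldl_nil]
        rw [if_pos (show Int.ofNat ys.length = dado_para_remover from h1.symm)]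
        have hk : dado_para_remover.toNat = ys.length := by omega
        have e4 : (ys ++ [y]).getD ys.length 0 = y := by
          rw [List.getD_eq_getElem?_getD, List.getElem?_append_right le_rfl]
          simp
        rw [hk, e4]
        have e2 : (ys ++ [y]).take ys.length = ys := by
          rw [List.take_append_of_le_length le_rfl, List.take_length]
        have e3 : (ys ++ [y]).drop (ys.length + 1) = [] := by
          apply List.drop_eq_nil_of_le
          simp
        rw [e2, e3, List.append_nil]
      · -- index out of range for ys ++ [y] too
        have h2 : ¬ (0 ≤ dado_para_remover ∧ dado_para_remover < ((ys.length + 1 : Nat) : Int)) := by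
          push_cast; omega
        rw [if_neg h0, if_neg h2]
        simp only [List.foldl_cons, List.foldl_nil]
        rw [if_neg (show Int.ofNat ys.length ≠ dado_para_remover by simp only [Int.ofNat_eq_natCast]; omega)]
        have e4 : (ys ++ [y]).getD ys.length 0 = y := by
          rw [List.getD_eq_getElem?_getD, List.getElem?_append_right le_rfl]
          simp
        rw [e4]

-- ===== VERDICT (by name: the statement is the Claim_ definition above) =====
theorem remover_dado_spec : Claim_equal_remover_dado := by
  intro r xs k _
  unfold Spec_remover_dado remover_dado remover_dado_alt
  rw [remover_loop]
  split_ifs <;> rfl
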